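-- pv_equiv track=rewrite | github.com/zxgsy520/NextnCoV | scripts/stat_group_vcf.py | stat_mutation
-- ===== SOURCE A (Python) =====
-- def stat_mutation(alt, mutlist):
--
--     alt = alt.split(',')
--     mut = []
--
--     mut.append(0)
--     for i in range(len(alt)):
--         mut.append(0)
--
--     for i in mutlist:
--         if i in ['.']:
--             continue
--         mut[0] += 1
--         if i in ['0']:
--             continue
--         i = int(i)
--         mut[i] += 1
--
--     return alt, mut
-- ===== SOURCE B (Python) =====
-- def stat_mutation(alt, mutlist):
--     counts = {}
--     for s in mutlist:
--         counts[s] = counts.get(s, 0) + 1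
--     alt = alt.split(',')
--     mut = [0] * (len(alt) + 1)
--     mut[0] = sum(c for k, c in counts.items() if k != '.')
--     for k, c in counts.items():
--         if k == '.' or k == '0':
--             continue
--         mut[int(k)] += c
--     return alt, mut
-- ===== Notes on version B (the rewrite author's own statement) =====
-- stated objective: idiomatic
-- what changed: B builds a frequency table of mutlist once and fills the histogram from the table's distinct keys scaled by their counts (mut[0] as one sum over the table), instead of A's per-element increment loop; on duplicate-heavy lists this parses each distinct entry only once.
import Mathlib
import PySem

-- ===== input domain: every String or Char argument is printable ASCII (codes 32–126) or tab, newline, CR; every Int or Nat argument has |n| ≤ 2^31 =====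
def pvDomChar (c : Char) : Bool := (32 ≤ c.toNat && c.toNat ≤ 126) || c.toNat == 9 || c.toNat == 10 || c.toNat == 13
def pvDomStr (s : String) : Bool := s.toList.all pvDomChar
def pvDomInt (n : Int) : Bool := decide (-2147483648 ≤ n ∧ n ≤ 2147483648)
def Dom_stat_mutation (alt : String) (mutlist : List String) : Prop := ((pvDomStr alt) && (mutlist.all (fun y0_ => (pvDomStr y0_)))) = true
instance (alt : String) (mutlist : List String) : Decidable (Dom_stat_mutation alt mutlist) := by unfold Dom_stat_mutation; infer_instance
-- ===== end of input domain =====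

-- B replaces A's per-element counting loop by a frequency table built once, then fills the
-- histogram from the table's distinct keys scaled by their counts (objective: idiomatic).

-- ===== PORT A =====
-- the body of A's 'for i in mutlist' loop
def stepA (m : List Int) (i : String) : List Int :=
  if i = "." then m
  else
    let m1 := PySem.List.pySetD m 0 (PySem.List.pyGetD m 0 0 + 1)
    if i = "0" then m1
    else
      let j := (PySem.Int.ofStr? i).getD 0
      PySem.List.pySetD m1 j (PySem.List.pyGetD m1 j 0 + 1)

def stat_mutation (alt : String) (mutlist : List String) : List String × List Int :=
  let alts := (PySem.Str.split? alt ",").getD []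
  let m0 : List Int := [0]
  let m1 := (PySem.List.pyRange 0 (alts.length : Int) 1).foldl (fun m _ => m ++ [(0 : Int)]) m0
  let m2 := mutlist.foldl stepA m1
  (alts, m2)

-- ===== PORT B =====
-- the body of B's 'for k, c in counts.items()' loop
def stepB (m : List Int) (q : String × Int) : List Int :=
  if q.1 = "." ∨ q.1 = "0" then m
  else
    let j := (PySem.Int.ofStr? q.1).getD 0
    PySem.List.pySetD m j (PySem.List.pyGetD m j 0 + q.2)

def stat_mutation_alt (alt : String) (mutlist : List String) : List String × List Int :=
  let counts := mutlist.foldl (fun d s => d.insert s (d.getD s 0 + 1)) (PySem.Dict.empty : PySem.Dict String Int)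
  let alts := (PySem.Str.split? alt ",").getD []
  let m0 : List Int := List.replicate (alts.length + 1) 0
  let m1 := m0.set 0 (((counts.items.filter (fun q => q.1 ≠ ".")).map Prod.snd).sum)
  let m2 := counts.items.foldl stepB m1
  (alts, m2)

-- ===== PRECONDITION & SPEC =====
-- Pre_ excludes exactly the inputs on which A raises: a mutlist entry (other than '.' and '0')
-- that is not an int literal (ValueError) or whose value is out of range for mut (IndexError).
def Pre_stat_mutation (alt : String) (mutlist : List String) : Prop :=
  ∀ s ∈ mutlist, s ≠ "." → s ≠ "0" →
    (PySem.Int.ofStr? s).isSome = true ∧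
    -((((PySem.Str.split? alt ",").getD []).length + 1 : Nat) : Int) ≤ (PySem.Int.ofStr? s).getD 0 ∧
    (PySem.Int.ofStr? s).getD 0 < ((((PySem.Str.split? alt ",").getD []).length + 1 : Nat) : Int)
instance (alt : String) (mutlist : List String) : Decidable (Pre_stat_mutation alt mutlist) := by
  unfold Pre_stat_mutation; infer_instance

def pvWitness_stat_mutation : String × List String := ("A,C", ["1", "-1", ".", "0", "2", "00"])

def Spec_stat_mutation (alt : String) (mutlist : List String) (out : List String × List Int) : Prop := out = stat_mutation_alt alt mutlist
instance (alt : String) (mutlist : List String) (out : List String × List Int) : Decidable (Spec_stat_mutation alt mutlist out) := by unfold Spec_stat_mutation; infer_instance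

-- ===== CLAIM (what is proved, stated in full; the proofs are below) =====
def Claim_equal_stat_mutation : Prop := ∀ (alt : String) (mutlist : List String), Dom_stat_mutation alt mutlist → Pre_stat_mutation alt mutlist → Spec_stat_mutation alt mutlist (stat_mutation alt mutlist)

-- ===== LEMMAS AND PROOFS =====

-- Python index normalisation: the cell a (possibly negative) in-range index i addresses
def nrm (L : Nat) (i : Int) : Nat := if 0 ≤ i then i.toNat else (i + L).toNat

-- validity of one mutlist entry w.r.t. mut length L
def OkS (L : Nat) (s : String) : Prop :=
  s = "." ∨ s = "0" ∨
    ((PySem.Int.ofStr? s).isSome = true ∧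
     -(L : Int) ≤ (PySem.Int.ofStr? s).getD 0 ∧ (PySem.Int.ofStr? s).getD 0 < (L : Int))

-- contribution of entry s to cell p (A's loop) and of a (key, count) pair (B's loop)
def wA (L : Nat) (s : String) (p : Nat) : Int :=
  (if s ≠ "." ∧ p = 0 then 1 else 0) +
  (if s ≠ "." ∧ s ≠ "0" ∧ p = nrm L ((PySem.Int.ofStr? s).getD 0) then 1 else 0)

def wB (L : Nat) (q : String × Int) (p : Nat) : Int :=
  if q.1 ≠ "." ∧ q.1 ≠ "0" ∧ p = nrm L ((PySem.Int.ofStr? q.1).getD 0) then q.2 else 0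

theorem nrm_lt (L : Nat) (i : Int) (h1 : -(L : Int) ≤ i) (h2 : i < (L : Int)) : nrm L i < L := by
  unfold nrm; split_ifs with h <;> omega

theorem pySetD_in_range (m : List Int) (i : Int) (v : Int)
    (h1 : -(m.length : Int) ≤ i) (h2 : i < (m.length : Int)) :
    PySem.List.pySetD m i v = m.set (nrm m.length i) v := by
  unfold nrm
  by_cases h : 0 ≤ i
  · rw [PySem.List.pySetD_of_nonneg m v h, if_pos h]
  · rw [if_neg h]
    simp only [PySem.List.pySetD, PySem.List.pySet?, PySem.List.pyIdx?]
    rw [if_neg h, if_pos h1]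
    simp only [Option.map_some, Option.getD_some]
    congr 1
    omega

theorem pyGetD_in_range (m : List Int) (i : Int)
    (h1 : -(m.length : Int) ≤ i) (h2 : i < (m.length : Int)) :
    PySem.List.pyGetD m i 0 = m.getD (nrm m.length i) 0 := by
  unfold nrm
  by_cases h : 0 ≤ i
  · rw [PySem.List.pyGetD_of_nonneg m 0 h, if_pos h]
  · rw [if_neg h]
    simp only [PySem.List.pyGetD, PySem.List.pyGet?, PySem.List.pyIdx?]
    rw [if_neg h, if_pos h1]
    simp only [Option.bind_some, List.getD_eq_getElem?_getD]
    have : m.length - (-i).toNat = (i + m.length).toNat := by omega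
    rw [this]

theorem getD_set (m : List Int) (n : Nat) (v : Int) (hn : n < m.length) (p : Nat) :
    (m.set n v).getD p 0 = if p = n then v else m.getD p 0 := by
  rcases eq_or_ne p n with rfl | hpn
  · simp [List.getD_eq_getElem?_getD, hn]
  · simp [List.getD_eq_getElem?_getD, List.getElem?_set_ne (by omega : n ≠ p), hpn]

theorem stepA_len (L : Nat) (s : String) (m : List Int) (hm : m.length = L) :
    (stepA m s).length = L := by
  unfold stepA
  split_ifs <;> simp [PySem.List.length_pySetD, hm]

theorem stepA_getD (L : Nat) (hL : 0 < L) (s : String) (hs : OkS L s)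
    (m : List Int) (hm : m.length = L) (p : Nat) :
    (stepA m s).getD p 0 = m.getD p 0 + wA L s p := by
  unfold stepA wA
  by_cases h1 : s = "."
  · simp [h1]
  · rw [if_neg h1]
    have hset0 : PySem.List.pySetD m 0 (PySem.List.pyGetD m 0 0 + 1)
        = m.set 0 (m.getD 0 0 + 1) := by
      rw [PySem.List.pySetD_of_nonneg m _ (by norm_num), PySem.List.pyGetD_zero]
      rfl
    by_cases h2 : s = "0"
    · rw [if_pos h2, hset0, getD_set m 0 _ (by omega) p]
      have hc2 : ¬ (s ≠ "." ∧ s ≠ "0" ∧ p = nrm L ((PySem.Int.ofStr? s).getD 0)) :=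
        fun hc => hc.2.1 h2
      rw [if_neg hc2]
      simp only [ne_eq, h1, not_false_iff, true_and]
      split_ifs <;> simp_all <;> omega
    · rw [if_neg h2]
      rcases hs with h | h | hok
      · exact absurd h h1
      · exact absurd h h2
      obtain ⟨hsome, hlo, hhi⟩ := hok
      set j := (PySem.Int.ofStr? s).getD 0 with hj
      have hm1len : (m.set 0 (m.getD 0 0 + 1)).length = L := by simp [hm]
      have hsetj : PySem.List.pySetD (m.set 0 (m.getD 0 0 + 1)) j
            (PySem.List.pyGetD (m.set 0 (m.getD 0 0 + 1)) j 0 + 1)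
          = (m.set 0 (m.getD 0 0 + 1)).set (nrm L j)
            ((m.set 0 (m.getD 0 0 + 1)).getD (nrm L j) 0 + 1) := by
        rw [pySetD_in_range _ _ _ (by rw [hm1len]; exact hlo) (by rw [hm1len]; exact hhi),
            pyGetD_in_range _ _ (by rw [hm1len]; exact hlo) (by rw [hm1len]; exact hhi), hm1len]
      rw [hset0, hsetj, getD_set _ _ _ (by rw [hm1len]; exact nrm_lt L j hlo hhi) p,
          getD_set m 0 _ (by omega) p, getD_set m 0 _ (by omega) (nrm L j)]
      simp only [ne_eq, h1, h2, not_false_iff, true_and]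
      split_ifs <;> simp_all <;> omega

theorem foldA_getD (L : Nat) (hL : 0 < L) (l : List String) (hl : ∀ s ∈ l, OkS L s) :
    ∀ m : List Int, m.length = L →
      (∀ p, (l.foldl stepA m).getD p 0 = m.getD p 0 + (l.map (fun s => wA L s p)).sum) ∧
      (l.foldl stepA m).length = L := by
  induction l with
  | nil => intro m hm; simp [hm]
  | cons s t ih =>
    intro m hm
    have hs := hl s (by simp)
    have ht : ∀ x ∈ t, OkS L x := fun x hx => hl x (by simp [hx])
    have h1 := stepA_len L s m hm
    obtain ⟨hg, hlen⟩ := ih ht (stepA m s) h1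
    refine ⟨fun p => ?_, by simpa using hlen⟩
    simp only [List.foldl_cons, List.map_cons, List.sum_cons]
    rw [hg p, stepA_getD L hL s hs m hm p]
    ring

theorem stepB_len (L : Nat) (q : String × Int) (m : List Int) (hm : m.length = L) :
    (stepB m q).length = L := by
  unfold stepB
  split_ifs <;> simp [PySem.List.length_pySetD, hm]

theorem stepB_getD (L : Nat) (q : String × Int) (hq : OkS L q.1)
    (m : List Int) (hm : m.length = L) (p : Nat) :
    (stepB m q).getD p 0 = m.getD p 0 + wB L q p := by
  unfold stepB wB
  by_cases h1 : q.1 = "." ∨ q.1 = "0"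
  · rw [if_pos h1]
    have : ¬ (q.1 ≠ "." ∧ q.1 ≠ "0" ∧ p = nrm L ((PySem.Int.ofStr? q.1).getD 0)) := by
      rcases h1 with h | h <;> simp [h]
    rw [if_neg this]; ring
  · rw [if_neg h1]
    push_neg at h1
    obtain ⟨hd, h0⟩ := h1
    rcases hq with h | h | hok
    · exact absurd h hd
    · exact absurd h h0
    obtain ⟨hsome, hlo, hhi⟩ := hok
    set j := (PySem.Int.ofStr? q.1).getD 0 with hj
    rw [pySetD_in_range _ _ _ (by rw [hm]; exact hlo) (by rw [hm]; exact hhi),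
        pyGetD_in_range _ _ (by rw [hm]; exact hlo) (by rw [hm]; exact hhi), hm,
        getD_set _ _ _ (by rw [hm]; exact nrm_lt L j hlo hhi) p]
    simp only [ne_eq, hd, h0, not_false_iff, true_and]
    split_ifs <;> simp_all <;> omega

theorem foldB_getD (L : Nat) (l : List (String × Int)) (hl : ∀ q ∈ l, OkS L q.1) :
    ∀ m : List Int, m.length = L →
      (∀ p, (l.foldl stepB m).getD p 0 = m.getD p 0 + (l.map (fun q => wB L q p)).sum) ∧
      (l.foldl stepB m).length = L := by
  induction l with
  | nil => intro m hm; simp [hm]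
  | cons q t ih =>
    intro m hm
    have hq := hl q (by simp)
    have ht : ∀ x ∈ t, OkS L x.1 := fun x hx => hl x (by simp [hx])
    have h1 := stepB_len L q m hm
    obtain ⟨hg, hlen⟩ := ih ht (stepB m q) h1
    refine ⟨fun p => ?_, by simpa using hlen⟩
    simp only [List.foldl_cons, List.map_cons, List.sum_cons]
    rw [hg p, stepB_getD L q hq m hm p]
    ring

-- sum over a list = sum over its distinct elements weighted by multiplicity
theorem countsum (l : List String) (g : String → Int) :
    (l.map g).sum = ((PySem.Set.ofList l).map (fun k => (List.count k l : Int) * g k)).sum := by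
  rw [Finset.sum_list_map_count l g]
  have hnd : (PySem.Set.ofList l).Nodup := PySem.Set.nodup_ofList l
  rw [← List.sum_toFinset _ hnd]
  have hfs : (PySem.Set.ofList l).toFinset = l.toFinset := by
    apply Finset.ext
    intro x
    simp [List.mem_toFinset, PySem.Set.mem_ofList]
  rw [hfs]
  exact Finset.sum_congr rfl fun x _ => by simp [nsmul_eq_mul]

theorem sum_map_add (α : Type) (l : List α) (f g : α → Int) :
    (l.map (fun x => f x + g x)).sum = (l.map f).sum + (l.map g).sum := by
  induction l with
  | nil => simp
  | cons x t ih => simp only [List.map_cons, List.sum_cons, ih]; ring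

theorem sum_if_filter (α : Type) (l : List α) (q : α → Prop) [DecidablePred q] (c : α → Int) :
    (l.map (fun k => if q k then c k else 0)).sum = ((l.filter (fun k => decide (q k))).map c).sum := by
  induction l with
  | nil => simp
  | cons x t ih =>
    by_cases h : q x <;> simp [h, ih]

theorem build_zero (α : Type) (l : List α) : ∀ m : List Int,
    l.foldl (fun m _ => m ++ [(0 : Int)]) m = m ++ List.replicate l.length 0 := by
  induction l with
  | nil => simp
  | cons x t ih =>
    intro m
    simp only [List.foldl_cons, ih, List.length_cons]
    simp [List.replicate_succ, List.append_assoc]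

theorem getD_replicate (L p : Nat) : (List.replicate L (0 : Int)).getD p 0 = 0 := by
  simp only [List.getD_eq_getElem?_getD, List.getElem?_replicate]
  split_ifs <;> simp

theorem list_eq_of_getD (la lb : List Int) (hlen : la.length = lb.length)
    (h : ∀ p : Nat, la.getD p 0 = lb.getD p 0) : la = lb := by
  apply List.ext_getElem hlen
  intro p h1 h2
  have := h p
  rwa [List.getD_eq_getElem _ _ h1, List.getD_eq_getElem _ _ h2] at this

-- ===== VERDICT (by name: the statement is the Claim_ definition above) =====
theorem stat_mutation_spec : Claim_equal_stat_mutation := by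
  intro alt mutlist _ hpre
  unfold Spec_stat_mutation stat_mutation stat_mutation_alt
  dsimp only
  rw [PySem.Dict.foldl_insert_getD_add_one_eq_counter, PySem.Dict.items_counter]
  set alts := (PySem.Str.split? alt ",").getD [] with halts
  set L := alts.length + 1 with hLdef
  set S := PySem.Set.ofList mutlist with hS
  set cnt : String → Int := fun k => (List.count k mutlist : Int) with hcnt
  have hL : 0 < L := by omega
  have hinit : (PySem.List.pyRange 0 (alts.length : Int) 1).foldl (fun m _ => m ++ [(0 : Int)]) [0]
      = List.replicate L 0 := by
    rw [build_zero]
    have hlen : (PySem.List.pyRange 0 (alts.length : Int) 1).length = alts.length := by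
      rw [PySem.List.length_pyRange_one]; omega
    rw [hlen, hLdef]
    simp [List.replicate_succ]
  have hOk : ∀ s ∈ mutlist, OkS L s := by
    intro s hs
    by_cases h1 : s = "."
    · exact Or.inl h1
    by_cases h2 : s = "0"
    · exact Or.inr (Or.inl h2)
    obtain ⟨ha, hb, hc⟩ := hpre s hs h1 h2
    rw [← halts] at hb hc
    refine Or.inr (Or.inr ⟨ha, ?_, ?_⟩)
    · push_cast at hb ⊢; omega
    · push_cast at hc ⊢; omega
  have hOkPairs : ∀ q ∈ S.map (fun k => (k, cnt k)), OkS L q.1 := by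
    intro q hq
    obtain ⟨k, hk, rfl⟩ := List.mem_map.mp hq
    exact hOk k ((PySem.Set.mem_ofList mutlist k).mp hk)
  set s0 : Int := (((S.map (fun k => (k, cnt k))).filter (fun q => q.1 ≠ ".")).map Prod.snd).sum with hs0
  obtain ⟨hgA, hlenA⟩ := foldA_getD L hL mutlist hOk (List.replicate L 0) (by simp)
  obtain ⟨hgB, hlenB⟩ := foldB_getD L (S.map (fun k => (k, cnt k))) hOkPairs
    ((List.replicate L 0).set 0 s0) (by simp)
  rw [hinit]
  refine Prod.ext rfl ?_
  apply list_eq_of_getD _ _ (by rw [hlenA, hlenB])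
  intro p
  rw [hgA p, hgB p, getD_replicate, getD_set _ 0 _ (by simp [hLdef]) p, getD_replicate]
  rw [zero_add]
  rw [countsum mutlist (fun s => wA L s p)]
  have hsplit : ∀ k ∈ S, ((List.count k mutlist : Int)) * wA L k p
      = (if k ≠ "." ∧ p = 0 then cnt k else 0) + wB L (k, cnt k) p := by
    intro k _
    simp only [hcnt]
    unfold wA wB
    dsimp only
    split_ifs <;> simp_all <;> ring
  rw [List.map_congr_left hsplit, sum_map_add]
  have hBside : (S.map (fun k => (k, cnt k))).map (fun q => wB L q p)
      = S.map (fun k => wB L (k, cnt k) p) := by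
    rw [List.map_map]
    rfl
  rw [hBside]
  congr 1
  rcases eq_or_ne p 0 with rfl | hp
  · have h1 : (S.map (fun k => if k ≠ "." ∧ (0 : Nat) = 0 then cnt k else 0))
        = S.map (fun k => if k ≠ "." then cnt k else 0) := by
      apply List.map_congr_left
      intro k _
      simp
    rw [if_pos rfl, h1, sum_if_filter String S (fun k => k ≠ ".") cnt, hs0, List.filter_map]
    rw [List.map_map]
    have e1 : (Prod.snd ∘ fun k : String => (k, cnt k)) = cnt := rfl
    have e2 : ((fun q : String × Int => decide (q.1 ≠ ".")) ∘ fun k : String => (k, cnt k))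
        = (fun k : String => decide (k ≠ ".")) := rfl
    rw [e1, e2]
  · have h1 : (S.map (fun k => if k ≠ "." ∧ p = 0 then cnt k else 0))
        = S.map (fun _ => (0 : Int)) := by
      apply List.map_congr_left
      intro k _
      rw [if_neg (fun hc => hp hc.2)]
    rw [h1, if_neg hp]
    simp
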